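-- pv_equiv track=rewrite | github.com/LukhasAI/Lukhas | fix_e402.py | extract_file_parts
-- ===== SOURCE A (Python) =====
-- from typing import List, Tuple
--
-- def extract_file_parts(content: str) -> Tuple[str, str, str, str]:
--     """
--     Extract: shebang, docstring, imports, rest
--     """
--     lines = content.split('\n')
--
--     shebang = ""
--     docstring = ""
--     imports = []
--     rest = []
--
--     i = 0
--
--     # Extract shebang
--     if lines and lines[0].startswith('#!'):
--         shebang = lines[0] + '\n'
--         i = 1
--
--     # Extract module-level docstring
--     in_docstring = False
--     docstring_delimiter = None
--     docstring_lines = []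
--
--     # Skip blank lines and comments before docstring
--     while i < len(lines) and (not lines[i].strip() or lines[i].strip().startswith('#')):
--         docstring_lines.append(lines[i])
--         i += 1
--
--     # Check for docstring
--     if i < len(lines):
--         line = lines[i].strip()
--         if line.startswith('"""') or line.startswith("'''"):
--             in_docstring = True
--             docstring_delimiter = '"""' if line.startswith('"""') else "'''"
--             docstring_lines.append(lines[i])
--             i += 1
--
--             # Multi-line docstring
--             if line != docstring_delimiter and not line.endswith(docstring_delimiter):
--                 while i < len(lines):
--                     docstring_lines.append(lines[i])
--                     if docstring_delimiter in lines[i]: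
--                         i += 1
--                         break
--                     i += 1
--
--     docstring = '\n'.join(docstring_lines) if docstring_lines else ""
--
--     # Now collect everything else
--     while i < len(lines):
--         rest.append(lines[i])
--         i += 1
--
--     rest_content = '\n'.join(rest)
--
--     # Find all imports in rest_content
--     import_lines = []
--     non_import_lines = []
--
--     for line in rest.split('\n') if isinstance(rest, str) else rest:
--         stripped = line.strip()
--         if (stripped.startswith('import ') or
--             stripped.startswith('from ') or
--             (stripped and import_lines and not stripped and not non_import_lines)):  # blank line after import
--             import_lines.append(line)
--         else:
--             non_import_lines.append(line)
--
--     imports_content = '\n'.join(import_lines)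
--     rest_content = '\n'.join(non_import_lines)
--
--     return shebang, docstring, imports_content, rest_content
-- ===== SOURCE B (Python) =====
-- def extract_file_parts(content: str):
--     # One forward pass with an explicit state machine; each line is routed to
--     # its bucket immediately (imports/rest are split during the same pass).
--     shebang = ''
--     doc, imp, rest = [], [], []
--     state = 'start'
--     delim = None
--     for line in content.split('\n'):
--         if state == 'start':
--             state = 'head'
--             if line.startswith('#!'):
--                 shebang = line + '\n'
--                 continue
--         s = line.strip()
--         if state == 'head':
--             if s == '' or s.startswith('#'):
--                 doc.append(line)
--                 continue
--             if s.startswith('"""') or s.startswith("'''"):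
--                 delim = '"""' if s.startswith('"""') else "'''"
--                 doc.append(line)
--                 state = 'doc' if (s != delim and not s.endswith(delim)) else 'body'
--                 continue
--             state = 'body'
--         if state == 'doc':
--             doc.append(line)
--             if delim in line:
--                 state = 'body'
--             continue
--         # body
--         (imp if s.startswith('import ') or s.startswith('from ') else rest).append(line)
--     return shebang, '\n'.join(doc), '\n'.join(imp), '\n'.join(rest)
-- ===== Notes on version B (the rewrite author's own statement) =====
-- stated objective: alternative
-- what changed: B replaces A's sequence of index-driven while loops plus a separate two-accumulator partition pass by a single forward pass: an explicit state machine (start/head/doc/body) that routes every line directly into its shebang/docstring/imports/rest bucket as it is seen.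
import Mathlib
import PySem

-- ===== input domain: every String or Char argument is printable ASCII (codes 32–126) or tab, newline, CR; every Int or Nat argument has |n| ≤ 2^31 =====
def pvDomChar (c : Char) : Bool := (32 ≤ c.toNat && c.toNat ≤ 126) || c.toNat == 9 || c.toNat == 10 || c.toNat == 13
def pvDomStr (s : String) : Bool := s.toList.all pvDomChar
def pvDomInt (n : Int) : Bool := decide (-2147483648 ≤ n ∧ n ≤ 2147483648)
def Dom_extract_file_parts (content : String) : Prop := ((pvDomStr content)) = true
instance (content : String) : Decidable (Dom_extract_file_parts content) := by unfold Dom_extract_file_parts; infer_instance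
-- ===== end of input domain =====

set_option maxHeartbeats 1000000


-- B replaces A's sequence of index-driven while loops and the two-accumulator
-- partition loop by ONE forward pass: a state machine routing each line directly
-- to its bucket (objective: alternative decomposition, same cost).

-- ===== PORT A =====

-- A's first while loop: consume blank/comment lines into docstring_lines, return the rest.
def pvAHeader : List String → List String × List String
  | [] => ([], [])
  | l :: ls =>
    if PySem.Str.strip l = "" || PySem.Str.startswith (PySem.Str.strip l) "#" then
      let p := pvAHeader ls
      (l :: p.1, p.2)
    else ([], l :: ls)

-- A's inner multi-line-docstring while loop: append lines, break after the first one containing d.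
def pvAConsume (d : String) : List String → List String × List String
  | [] => ([], [])
  | l :: ls =>
    if PySem.Str.isIn d l then ([l], ls)
    else
      let p := pvAConsume d ls
      (l :: p.1, p.2)

-- A's 'check for docstring' block, applied to the lines left after the comment-skipping loop.
def pvADocStep (head : List String) : List String → List String × List String
  | [] => (head, [])
  | l :: ls =>
    let line := PySem.Str.strip l
    if PySem.Str.startswith line "\"\"\"" || PySem.Str.startswith line "'''" then
      let d := if PySem.Str.startswith line "\"\"\"" then "\"\"\"" else "'''"
      if line ≠ d ∧ ¬ PySem.Str.endswith line d then
        let q := pvAConsume d ls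
        (head ++ (l :: q.1), q.2)
      else (head ++ [l], ls)
    else (head, l :: ls)

-- A's docstring phase: (docstring_lines, rest).
def pvADoc (body : List String) : List String × List String :=
  let p1 := pvAHeader body
  pvADocStep p1.1 p1.2

-- A's for loop over rest: append each line to import_lines or non_import_lines (dead third disjunct kept).
def pvAPartition (rest : List String) : List String × List String :=
  rest.foldl
    (fun acc l =>
      let stripped := PySem.Str.strip l
      if PySem.Str.startswith stripped "import " || PySem.Str.startswith stripped "from " ||
          (!(stripped == "") && !(acc.1 == []) && (stripped == "") && (acc.2 == [])) then
        (acc.1 ++ [l], acc.2)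
      else (acc.1, acc.2 ++ [l]))
    ([], [])

def extract_file_parts (content : String) : String × String × String × String :=
  let lines := (PySem.Str.split? content "\n").getD []  -- sep ≠ "": split? is always some
  let shebang : String :=
    match lines with
    | l0 :: _ => if PySem.Str.startswith l0 "#!" then l0 ++ "\n" else ""
    | [] => ""
  let after0 : List String :=
    match lines with
    | l0 :: ls => if PySem.Str.startswith l0 "#!" then ls else l0 :: ls
    | [] => []
  let p2 := pvADoc after0
  let docstring := if p2.1 = [] then "" else PySem.Str.join "\n" p2.1
  let pr := pvAPartition p2.2
  (shebang, docstring, PySem.Str.join "\n" pr.1, PySem.Str.join "\n" pr.2)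

-- ===== PORT B =====

-- Source B's state variable: 'start' | 'head' | 'doc' (carrying the delimiter) | 'body'.
inductive PvPhase : Type
  | start : PvPhase
  | head : PvPhase
  | doc : String → PvPhase
  | body : PvPhase
deriving DecidableEq, Repr

-- loop state: (state, shebang, doc, imp, rest)
def PvSt : Type := PvPhase × String × List String × List String × List String

-- Source B's body branch: route the line to imports or rest.
def pvBodyStep (line : String) (sb : String) (doc imp rest : List String) : PvSt :=
  if PySem.Str.startswith (PySem.Str.strip line) "import " ||
      PySem.Str.startswith (PySem.Str.strip line) "from " then
    (PvPhase.body, sb, doc, imp ++ [line], rest)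
  else (PvPhase.body, sb, doc, imp, rest ++ [line])

-- Source B's head branch (falls through to the body branch on a plain line).
def pvHeadStep (line : String) (sb : String) (doc imp rest : List String) : PvSt :=
  let s := PySem.Str.strip line
  if s = "" || PySem.Str.startswith s "#" then (PvPhase.head, sb, doc ++ [line], imp, rest)
  else if PySem.Str.startswith s "\"\"\"" || PySem.Str.startswith s "'''" then
    let d := if PySem.Str.startswith s "\"\"\"" then "\"\"\"" else "'''"
    if s ≠ d ∧ ¬ PySem.Str.endswith s d then (PvPhase.doc d, sb, doc ++ [line], imp, rest)
    else (PvPhase.body, sb, doc ++ [line], imp, rest)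
  else pvBodyStep line sb doc imp rest

-- Source B's loop body: one step of the state machine.
def pvBStep (st : PvSt) (line : String) : PvSt :=
  match st with
  | (PvPhase.start, sb, doc, imp, rest) =>
    if PySem.Str.startswith line "#!" then (PvPhase.head, line ++ "\n", doc, imp, rest)
    else pvHeadStep line sb doc imp rest
  | (PvPhase.head, sb, doc, imp, rest) => pvHeadStep line sb doc imp rest
  | (PvPhase.doc d, sb, doc, imp, rest) =>
    if PySem.Str.isIn d line then (PvPhase.body, sb, doc ++ [line], imp, rest)
    else (PvPhase.doc d, sb, doc ++ [line], imp, rest)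
  | (PvPhase.body, sb, doc, imp, rest) => pvBodyStep line sb doc imp rest

def extract_file_parts_alt (content : String) : String × String × String × String :=
  let lines := (PySem.Str.split? content "\n").getD []  -- sep ≠ "": split? is always some
  let fin := lines.foldl pvBStep (PvPhase.start, "", [], [], [])
  (fin.2.1, PySem.Str.join "\n" fin.2.2.1,
   PySem.Str.join "\n" fin.2.2.2.1, PySem.Str.join "\n" fin.2.2.2.2)

-- ===== PRECONDITION & SPEC =====
def Spec_extract_file_parts (content : String) (out : String × String × String × String) : Prop := out = extract_file_parts_alt content
instance (content : String) (out : String × String × String × String) : Decidable (Spec_extract_file_parts content out) := by unfold Spec_extract_file_parts; infer_instance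

-- ===== CLAIM (what is proved, stated in full; the proofs are below) =====
def Claim_equal_extract_file_parts : Prop := ∀ (content : String), Dom_extract_file_parts content → Spec_extract_file_parts content (extract_file_parts content)

-- ===== LEMMAS AND PROOFS =====

def pvBIsImport (l : String) : Bool :=
  PySem.Str.startswith (PySem.Str.strip l) "import " ||
  PySem.Str.startswith (PySem.Str.strip l) "from "

-- from the body state the machine just filters lines into the two buckets
theorem pvFoldl_body (ls : List String) (sb : String) (d i r : List String) :
    (List.foldl pvBStep (PvPhase.body, sb, d, i, r) ls).2 =
      (sb, d, i ++ ls.filter pvBIsImport, r ++ ls.filter (fun l => !pvBIsImport l)) := by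
  induction ls generalizing i r with
  | nil => simp
  | cons l ls ih =>
    rw [List.foldl_cons]
    show (List.foldl pvBStep (pvBodyStep l sb d i r) ls).2 = _
    unfold pvBodyStep
    cases h : pvBIsImport l with
    | false =>
      rw [if_neg (by simpa [pvBIsImport] using h), ih]
      simp [h]
    | true =>
      rw [if_pos (by simpa [pvBIsImport] using h), ih]
      simp [h]

-- from the doc state the machine consumes pvAConsume's lines, then behaves as body
theorem pvFoldl_doc (ls : List String) (dm sb : String) (d i r : List String) :
    (List.foldl pvBStep (PvPhase.doc dm, sb, d, i, r) ls).2 =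
      (List.foldl pvBStep (PvPhase.body, sb, d ++ (pvAConsume dm ls).1, i, r)
        (pvAConsume dm ls).2).2 := by
  induction ls generalizing d with
  | nil => simp [pvAConsume]
  | cons l ls ih =>
    rw [List.foldl_cons]
    show (List.foldl pvBStep
        (if PySem.Str.isIn dm l then (PvPhase.body, sb, d ++ [l], i, r)
         else (PvPhase.doc dm, sb, d ++ [l], i, r)) ls).2 = _
    unfold pvAConsume
    split_ifs with h
    · simp
    · rw [ih]; simp

-- from the head state the machine computes A's header + docstring phases, then body
theorem pvFoldl_head (ls : List String) (sb : String) (d i r : List String) :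
    (List.foldl pvBStep (PvPhase.head, sb, d, i, r) ls).2 =
      (List.foldl pvBStep
        (PvPhase.body, sb, (pvADocStep (d ++ (pvAHeader ls).1) (pvAHeader ls).2).1, i, r)
        (pvADocStep (d ++ (pvAHeader ls).1) (pvAHeader ls).2).2).2 := by
  induction ls generalizing d with
  | nil => simp [pvAHeader, pvADocStep]
  | cons l ls ih =>
    rw [List.foldl_cons]
    show (List.foldl pvBStep (pvHeadStep l sb d i r) ls).2 = _
    simp only [pvHeadStep, pvAHeader]
    by_cases hc1 : (PySem.Str.strip l = "" || PySem.Str.startswith (PySem.Str.strip l) "#") = true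
    · rw [if_pos hc1, if_pos hc1, ih]
      have hx : d ++ l :: (pvAHeader ls).1 = (d ++ [l]) ++ (pvAHeader ls).1 := by simp
      rw [hx]
    · rw [if_neg hc1, if_neg hc1]
      simp only [pvADocStep]
      by_cases hc2 : (PySem.Str.startswith (PySem.Str.strip l) "\"\"\"" ||
          PySem.Str.startswith (PySem.Str.strip l) "'''") = true
      · rw [if_pos hc2, if_pos hc2]
        split_ifs <;>
          first
            | (rw [pvFoldl_doc]; simp)
            | simp
      · rw [if_neg hc2, if_neg hc2]
        rw [List.foldl_cons]
        simp [pvBStep]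

-- A's third disjunct demands both stripped ≠ "" and stripped = "": false for every accumulator.
theorem pvCond_eq (l : String) (as bs : List String) :
    (PySem.Str.startswith (PySem.Str.strip l) "import " || PySem.Str.startswith (PySem.Str.strip l) "from " ||
      (!(PySem.Str.strip l == "") && !(as == []) && (PySem.Str.strip l == "") && (bs == []))) = pvBIsImport l := by
  unfold pvBIsImport
  cases h : (PySem.Str.strip l == "") <;>
    cases PySem.Str.startswith (PySem.Str.strip l) "import " <;>
    cases PySem.Str.startswith (PySem.Str.strip l) "from " <;> simp

theorem pvAPartition_eq (rest : List String) :
    pvAPartition rest = (rest.filter pvBIsImport, rest.filter (fun l => !pvBIsImport l)) := by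
  unfold pvAPartition
  suffices h : ∀ (as bs : List String),
      rest.foldl
        (fun acc l =>
          let stripped := PySem.Str.strip l
          if PySem.Str.startswith stripped "import " || PySem.Str.startswith stripped "from " ||
              (!(stripped == "") && !(acc.1 == []) && (stripped == "") && (acc.2 == [])) then
            (acc.1 ++ [l], acc.2)
          else (acc.1, acc.2 ++ [l]))
        (as, bs)
      = (as ++ rest.filter pvBIsImport, bs ++ rest.filter (fun l => !pvBIsImport l)) by
    simpa using h [] []
  induction rest with
  | nil => intro as bs; simp
  | cons l ls ih =>
    intro as bs
    rw [List.foldl_cons]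
    show (ls.foldl _ (if (PySem.Str.startswith (PySem.Str.strip l) "import " || PySem.Str.startswith (PySem.Str.strip l) "from " ||
              (!(PySem.Str.strip l == "") && !(as == []) && (PySem.Str.strip l == "") && (bs == []))) = true then
            (as ++ [l], bs) else (as, bs ++ [l]))) = _
    rw [pvCond_eq]
    cases hi : pvBIsImport l
    · rw [if_neg (by simp), ih]
      simp [hi]
    · rw [if_pos rfl, ih]
      simp [hi]

-- A's 'if docstring_lines else ""' is the plain join (join of [] is "")
theorem pvJoin_of_ne_nil (xs : List String) :
    (if xs = [] then "" else PySem.Str.join "\n" xs) = PySem.Str.join "\n" xs := by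
  split_ifs with h
  · subst h; rfl
  · rfl

-- ===== VERDICT (by name: the statement is the Claim_ definition above) =====
theorem extract_file_parts_spec : Claim_equal_extract_file_parts := by
  intro content _
  unfold Spec_extract_file_parts
  simp only [extract_file_parts, extract_file_parts_alt]
  cases hl : (PySem.Str.split? content "\n").getD [] with
  | nil => rfl
  | cons l0 ls =>
    rw [List.foldl_cons]
    simp only [pvBStep]
    by_cases hsh : PySem.Str.startswith l0 "#!" = true
    · rw [if_pos hsh, if_pos hsh, if_pos hsh]
      rw [pvFoldl_head, pvFoldl_body]
      simp only [pvADoc, pvAPartition_eq, pvJoin_of_ne_nil, List.nil_append]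
    · rw [if_neg hsh, if_neg hsh, if_neg hsh]
      have hfold : List.foldl pvBStep (pvHeadStep l0 "" [] [] []) ls =
          List.foldl pvBStep (PvPhase.head, "", [], [], []) (l0 :: ls) := rfl
      rw [hfold, pvFoldl_head, pvFoldl_body]
      simp only [pvADoc, pvAPartition_eq, pvJoin_of_ne_nil, List.nil_append]
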